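-- pv_equiv track=rewrite | github.com/oulipoly/agent-software-developer-skill | risk/posture.py | _count_trailing_successes
-- ===== SOURCE A (Python) =====
-- def _count_trailing_successes(recent_outcomes: list[str]) -> int:
--     count = 0
--     for outcome in reversed(recent_outcomes):
--         if _is_success(outcome):
--             count += 1
--             continue
--         break
--     return count
--
-- def _is_success(outcome: str) -> bool:
--     normalized = outcome.strip().lower()
--     return normalized in {"success", "passed", "pass", "accepted"}
-- ===== SOURCE B (Python) =====
-- def _count_trailing_successes(recent_outcomes: list[str]) -> int:
--     count = 0
--     for outcome in recent_outcomes: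
--         if _is_success(outcome):
--             count += 1
--         else:
--             count = 0
--     return count
--
-- def _is_success(outcome: str) -> bool:
--     normalized = outcome.strip().lower()
--     return normalized in {"success", "passed", "pass", "accepted"}
-- ===== Notes on version B (the rewrite author's own statement) =====
-- stated objective: alternative
-- what changed: Replaces the backward scan with early break by a single forward pass maintaining a run counter that resets to 0 on each non-success.
import Mathlib
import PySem

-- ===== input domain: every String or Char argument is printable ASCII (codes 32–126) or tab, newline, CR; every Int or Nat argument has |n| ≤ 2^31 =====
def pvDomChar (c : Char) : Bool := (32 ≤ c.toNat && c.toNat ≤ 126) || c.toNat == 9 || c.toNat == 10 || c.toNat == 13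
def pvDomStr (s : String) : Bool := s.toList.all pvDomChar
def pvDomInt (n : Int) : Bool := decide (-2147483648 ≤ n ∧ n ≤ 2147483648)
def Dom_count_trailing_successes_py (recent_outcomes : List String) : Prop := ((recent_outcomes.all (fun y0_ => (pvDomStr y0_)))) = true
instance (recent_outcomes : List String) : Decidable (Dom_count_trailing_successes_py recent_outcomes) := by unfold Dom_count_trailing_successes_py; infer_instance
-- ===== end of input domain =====

-- B replaces A's backward scan with early break by one forward pass with a reset-on-failure run counter (alternative decomposition, same cost).


-- ===== PORT A =====
-- _is_success: strip, lower, membership in the four success literals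
def is_success_py (outcome : String) : Bool :=
  let normalized := PySem.Str.lower (PySem.Str.strip outcome)
  normalized == "success" || normalized == "passed" || normalized == "pass" || normalized == "accepted"

-- the `for … in reversed(…)` loop with break: structural recursion over the reversed list
def aLoop : List String → Int
  | [] => 0
  | x :: xs => if is_success_py x then aLoop xs + 1 else 0

def count_trailing_successes_py (recent_outcomes : List String) : Int :=
  aLoop recent_outcomes.reverse

-- ===== PORT B =====
-- forward pass: run counter, reset to 0 on non-success
def count_trailing_successes_py_alt (recent_outcomes : List String) : Int :=
  recent_outcomes.foldl (fun count outcome => if is_success_py outcome then count + 1 else 0) 0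

-- ===== PRECONDITION & SPEC =====
def Spec_count_trailing_successes_py (recent_outcomes : List String) (out : Int) : Prop := out = count_trailing_successes_py_alt recent_outcomes
instance (recent_outcomes : List String) (out : Int) : Decidable (Spec_count_trailing_successes_py recent_outcomes out) := by unfold Spec_count_trailing_successes_py; infer_instance

-- ===== CLAIM (what is proved, stated in full; the proofs are below) =====
def Claim_equal_count_trailing_successes_py : Prop := ∀ (recent_outcomes : List String), Dom_count_trailing_successes_py recent_outcomes → Spec_count_trailing_successes_py recent_outcomes (count_trailing_successes_py recent_outcomes)

-- ===== LEMMAS AND PROOFS =====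
theorem aLoop_reverse_eq_foldl (xs : List String) :
    aLoop xs.reverse = xs.foldl (fun count outcome => if is_success_py outcome then count + 1 else 0) 0 := by
  induction xs using List.reverseRecOn with
  | nil => simp [aLoop]
  | append_singleton ys y ih =>
      by_cases h : is_success_py y
      · simp [aLoop, h, ih]
      · simp [aLoop, h]

-- ===== VERDICT (by name: the statement is the Claim_ definition above) =====
theorem count_trailing_successes_py_spec : Claim_equal_count_trailing_successes_py := by
  intro xs _
  unfold Spec_count_trailing_successes_py count_trailing_successes_py count_trailing_successes_py_alt
  exact aLoop_reverse_eq_foldl xs
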